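-- pv_equiv track=rewrite | github.com/arpg/vla-foundations | src/assignments/scratch-1/visualize.py | trim_to_last_run
-- ===== SOURCE A (Python) =====
-- def trim_to_last_run(steps, losses):
--     """
--     If steps reset (e.g., training restarted and appended to same CSV),
--     keep only the last run segment.
--     """
--     if not steps:
--         return steps, losses
--
--     cut = 0
--     for i in range(1, len(steps)):
--         if steps[i] < steps[i - 1]:
--             cut = i
--     return steps[cut:], losses[cut:]
-- ===== SOURCE B (Python) =====
-- def trim_to_last_run(steps, losses):
--     """Rebuild the last run segment directly: accumulate steps into the
--     current segment, restarting it whenever a step value drops, then drop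
--     the same number of leading losses."""
--     seg = []
--     for s in steps:
--         if seg and s < seg[-1]:
--             seg = [s]
--         else:
--             seg.append(s)
--     return seg, losses[len(steps) - len(seg):]
-- ===== Notes on version B (the rewrite author's own statement) =====
-- stated objective: alternative
-- what changed: B never computes a cut index over steps at all: it rebuilds the last run segment itself as an accumulator that is reset at each descent, and recovers the losses tail from the segment's length; A records the index of the last descent and slices both lists.
import Mathlib
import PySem

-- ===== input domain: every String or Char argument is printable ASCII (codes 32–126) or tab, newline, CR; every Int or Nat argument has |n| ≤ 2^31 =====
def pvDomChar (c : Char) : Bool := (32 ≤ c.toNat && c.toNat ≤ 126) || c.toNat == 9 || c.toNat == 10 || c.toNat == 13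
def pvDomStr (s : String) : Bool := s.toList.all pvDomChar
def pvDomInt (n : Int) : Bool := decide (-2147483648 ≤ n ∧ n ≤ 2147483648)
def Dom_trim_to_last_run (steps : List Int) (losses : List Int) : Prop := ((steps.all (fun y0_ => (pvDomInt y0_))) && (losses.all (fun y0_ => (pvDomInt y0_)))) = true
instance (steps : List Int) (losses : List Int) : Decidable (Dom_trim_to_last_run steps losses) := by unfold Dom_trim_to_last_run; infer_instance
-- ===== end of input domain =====

-- B never computes a cut index over steps: it rebuilds the last run segment itself as an
-- accumulator reset at each descent, and drops leading losses by the segment's length;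
-- objective: alternative decomposition, same cost.

-- ===== PORT A =====
-- forward index pass: for i in range(1, len(steps)): if steps[i] < steps[i-1]: cut = i
def trim_to_last_run (steps : List Int) (losses : List Int) : List Int × List Int :=
  if steps = [] then (steps, losses)
  else
    let cut : Int :=
      (PySem.List.pyRange 1 (PySem.List.len steps) 1).foldl
        (fun cut i =>
          if PySem.List.pyGetD steps i 0 < PySem.List.pyGetD steps (i - 1) 0 then i else cut) 0
    (PySem.List.slice steps (some cut) none, PySem.List.slice losses (some cut) none)

-- ===== PORT B =====
-- segment accumulator: reset to [s] on a descent (s < seg[-1]), else append s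
def trim_to_last_run_alt (steps : List Int) (losses : List Int) : List Int × List Int :=
  let seg : List Int :=
    steps.foldl
      (fun seg s =>
        if seg ≠ [] ∧ s < PySem.List.pyGetD seg (-1) 0 then [s] else seg ++ [s]) []
  (seg, PySem.List.slice losses (some (PySem.List.len steps - PySem.List.len seg)) none)

-- ===== PRECONDITION & SPEC =====
def Spec_trim_to_last_run (steps : List Int) (losses : List Int) (out : List Int × List Int) : Prop := out = trim_to_last_run_alt steps losses
instance (steps : List Int) (losses : List Int) (out : List Int × List Int) : Decidable (Spec_trim_to_last_run steps losses out) := by unfold Spec_trim_to_last_run; infer_instance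

-- ===== CLAIM (what is proved, stated in full; the proofs are below) =====
def Claim_equal_trim_to_last_run : Prop := ∀ (steps : List Int) (losses : List Int), Dom_trim_to_last_run steps losses → Spec_trim_to_last_run steps losses (trim_to_last_run steps losses)

-- ===== LEMMAS AND PROOFS =====

-- A's cut index and B's segment, as standalone functions of the steps list
def pvCutA (xs : List Int) : Int :=
  (PySem.List.pyRange 1 (PySem.List.len xs) 1).foldl
    (fun cut i =>
      if PySem.List.pyGetD xs i 0 < PySem.List.pyGetD xs (i - 1) 0 then i else cut) 0

def pvSegB (xs : List Int) : List Int :=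
  xs.foldl
    (fun seg s =>
      if seg ≠ [] ∧ s < PySem.List.pyGetD seg (-1) 0 then [s] else seg ++ [s]) []

-- one snoc step of B's fold
theorem pvSegB_snoc (xs : List Int) (x : Int) :
    pvSegB (xs ++ [x]) =
      if pvSegB xs ≠ [] ∧ x < PySem.List.pyGetD (pvSegB xs) (-1) 0 then [x]
      else pvSegB xs ++ [x] := by
  unfold pvSegB
  rw [List.foldl_append]
  rfl

-- indices strictly inside xs read the same in xs ++ [x]
theorem pvGetD_append_lt (xs : List Int) (x : Int) (i : Int) (h0 : 0 ≤ i)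
    (h1 : i < xs.length) :
    PySem.List.pyGetD (xs ++ [x]) i 0 = PySem.List.pyGetD xs i 0 := by
  rw [PySem.List.pyGetD_eq_getElem (xs ++ [x]) 0 h0 (by simp; omega),
      PySem.List.pyGetD_eq_getElem xs 0 h0 (by exact_mod_cast h1),
      List.getElem_append_left]

-- the joint invariant, by induction on the list from the right
theorem pv_inv (xs : List Int) :
    pvSegB xs = xs.drop (pvCutA xs).toNat ∧ 0 ≤ pvCutA xs ∧
      (xs ≠ [] → (pvCutA xs).toNat < xs.length) := by
  induction xs using List.reverseRecOn with
  | nil => simp [pvSegB, pvCutA, PySem.List.pyRange_one_eq_nil]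
  | append_singleton xs x ih =>
    obtain ⟨hseg, hc0, hlt⟩ := ih
    by_cases hx : xs = []
    · subst hx
      have h1 : pvCutA [x] = 0 := by
        unfold pvCutA
        rw [show PySem.List.len [x] = 1 from by simp [PySem.List.len_eq],
            PySem.List.pyRange_one_eq_nil le_rfl]
        rfl
      have h2 : pvSegB [x] = [x] := by simp [pvSegB]
      simp only [List.nil_append]
      exact ⟨by rw [h1, h2]; rfl, by rw [h1], fun _ => by rw [h1]; simp⟩
    · have hn : 1 ≤ (xs.length : Int) := by
        cases xs with
        | nil => exact absurd rfl hx
        | cons a t => simp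
      have hlt' := hlt hx
      -- last element of xs, read at index len-1 of xs ++ [x]
      have hxlast : PySem.List.pyGetD (xs ++ [x]) ((xs.length : Int) - 1) 0 =
          xs.getLast hx := by
        rw [pvGetD_append_lt xs x _ (by omega) (by omega)]
        rw [PySem.List.pyGetD_eq_getElem xs 0 (by omega) (by omega)]
        rw [List.getLast_eq_getElem]
        congr 1
        omega
      -- unfold A's fold over the extended range
      have hcutA : pvCutA (xs ++ [x]) =
          if x < xs.getLast hx then (xs.length : Int) else pvCutA xs := by
        unfold pvCutA
        have hlen : PySem.List.len (xs ++ [x]) = (xs.length : Int) + 1 := by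
          simp [PySem.List.len_eq]
        rw [hlen, PySem.List.pyRange_one_succ_right hn, List.foldl_append]
        simp only [List.foldl_cons, List.foldl_nil]
        have hcongr :
            (PySem.List.pyRange 1 (xs.length : Int) 1).foldl
              (fun cut i =>
                if PySem.List.pyGetD (xs ++ [x]) i 0 <
                    PySem.List.pyGetD (xs ++ [x]) (i - 1) 0 then i else cut) 0 =
            (PySem.List.pyRange 1 (xs.length : Int) 1).foldl
              (fun cut i =>
                if PySem.List.pyGetD xs i 0 <
                    PySem.List.pyGetD xs (i - 1) 0 then i else cut) 0 := by
          apply PySem.List.foldl_congr_mem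
          intro acc i hi
          rw [PySem.List.mem_pyRange_one] at hi
          rw [pvGetD_append_lt xs x i (by omega) (by omega),
              pvGetD_append_lt xs x (i - 1) (by omega) (by omega)]
        rw [hcongr]
        have hxget : PySem.List.pyGetD (xs ++ [x]) (xs.length : Int) 0 = x := by
          rw [PySem.List.pyGetD_eq_getElem (xs ++ [x]) 0 (by omega) (by simp)]
          simp
        rw [hxget, hxlast]
        rw [show PySem.List.len xs = (xs.length : Int) from PySem.List.len_eq xs]
      -- B's segment is nonempty and ends with xs's last element
      have hsegne : pvSegB xs ≠ [] := by
        rw [hseg]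
        intro h
        have := List.drop_eq_nil_iff.mp h
        omega
      have hseglast : PySem.List.pyGetD (pvSegB xs) (-1) 0 = xs.getLast hx := by
        rw [PySem.List.pyGetD_neg_one _ _ hsegne]
        apply Option.some.inj
        rw [← List.getLast?_eq_some_getLast hsegne,
            ← List.getLast?_eq_some_getLast hx, hseg, List.getLast?_drop]
        simp [Nat.not_le.mpr hlt']
      have hsegB : pvSegB (xs ++ [x]) =
          if x < xs.getLast hx then [x] else pvSegB xs ++ [x] := by
        rw [pvSegB_snoc, hseglast]
        simp [hsegne]
      by_cases hdrop : x < xs.getLast hx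
      · rw [hcutA, hsegB]
        simp only [if_pos hdrop]
        refine ⟨?_, by omega, fun _ => by simp⟩
        rw [Int.toNat_natCast, List.drop_append_of_le_length le_rfl]
        simp
      · rw [hcutA, hsegB]
        simp only [if_neg hdrop]
        refine ⟨?_, hc0, fun _ => by simp; omega⟩
        rw [hseg, List.drop_append_of_le_length (by omega)]

theorem pv_trim_eq (steps losses : List Int) :
    trim_to_last_run steps losses = trim_to_last_run_alt steps losses := by
  obtain ⟨hseg, hc0, hlt⟩ := pv_inv steps
  unfold trim_to_last_run trim_to_last_run_alt
  by_cases h : steps = []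
  · subst h
    have h2 : pvSegB ([] : List Int) = [] := by simp [pvSegB]
    show (([] : List Int), losses) = _
    rw [show ([] : List Int).foldl
        (fun seg s => if seg ≠ [] ∧ s < PySem.List.pyGetD seg (-1) 0 then [s]
          else seg ++ [s]) [] = pvSegB [] from rfl, h2]
    simp [PySem.List.len_eq, PySem.List.slice_none_none]
  · simp only [h, if_false]
    have hlt' := hlt h
    show (PySem.List.slice steps (some (pvCutA steps)) none,
          PySem.List.slice losses (some (pvCutA steps)) none) =
         (pvSegB steps,
          PySem.List.slice losses
            (some (PySem.List.len steps - PySem.List.len (pvSegB steps))) none)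
    have hlen : PySem.List.len steps - PySem.List.len (pvSegB steps) = pvCutA steps := by
      simp only [PySem.List.len_eq, hseg, List.length_drop]
      omega
    rw [hlen, hseg, PySem.List.slice_from steps hc0]

-- ===== VERDICT (by name: the statement is the Claim_ definition above) =====
theorem trim_to_last_run_spec : Claim_equal_trim_to_last_run := by
  intro steps losses _
  exact pv_trim_eq steps losses
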